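-- pv_equiv track=rewrite | github.com/SauravSinha76/scaler | contest5/petrolPrice.py | solve
-- ===== SOURCE A (Python) =====
-- def solve(A,B):
--     n = len(A)
--
--     total =0
--     count = 0
--     for i in range(n):
--         if count == 0:
--             for j in range(i+1,n):
--                 if j < i + B and A[i] < A[j]:
--                     count += 1
--             total += A[i] * count
--         count -= 1
--     return total
-- ===== SOURCE B (Python) =====
-- def solve(A, B):
--     n = len(A)
--
--     # merge-sort tree: each node keeps a sorted copy of its segment, so
--     # "how many elements > v in positions [l, r)" is answered by descending
--     # the tree and binary-searching the sorted lists, instead of scanning.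
--     def build(xs):
--         m = len(xs)
--         if m == 0:
--             return ('leaf',)
--         if m == 1:
--             return ('single', xs[0])
--         h = m // 2
--         return ('node', m, sorted(xs), build(xs[:h]), build(xs[h:]))
--
--     def upper_bound(s, v):
--         # first index whose element is > v (hand-rolled, bisect_right)
--         lo, hi = 0, len(s)
--         while lo < hi:
--             mid = (lo + hi) // 2
--             if s[mid] <= v:
--                 lo = mid + 1
--             else:
--                 hi = mid
--         return lo
--
--     def query(t, l, r, v):
--         # number of elements > v among positions l..r-1 of t's segment
--         if t[0] == 'leaf':
--             return 0
--         if t[0] == 'single':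
--             return 1 if l <= 0 and r >= 1 and v < t[1] else 0
--         m, s = t[1], t[2]
--         if r <= 0 or l >= m:
--             return 0
--         if l <= 0 and r >= m:
--             return len(s) - upper_bound(s, v)
--         h = m // 2
--         return query(t[3], l, r, v) + query(t[4], l - h, r - h, v)
--
--     tree = build(A)
--     total = 0
--     i = 0
--     while i < n:
--         pivot = A[i]
--         c = query(tree, i + 1, i + B, pivot)
--         total += pivot * c
--         if c == 0:
--             break
--         i += c
--     return total
-- ===== Notes on version B (the rewrite author's own statement) =====
-- stated objective: alternative
-- what changed: B builds a merge-sort tree (segment tree whose nodes hold sorted copies of their segment) once and answers each 'how many window elements exceed the pivot' question by descending the tree with a hand-rolled binary search, instead of A's linear rescan of the whole tail at every recomputation index; the jump process over active indices is driven by those O(log^2 n) queries.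
import Mathlib
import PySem

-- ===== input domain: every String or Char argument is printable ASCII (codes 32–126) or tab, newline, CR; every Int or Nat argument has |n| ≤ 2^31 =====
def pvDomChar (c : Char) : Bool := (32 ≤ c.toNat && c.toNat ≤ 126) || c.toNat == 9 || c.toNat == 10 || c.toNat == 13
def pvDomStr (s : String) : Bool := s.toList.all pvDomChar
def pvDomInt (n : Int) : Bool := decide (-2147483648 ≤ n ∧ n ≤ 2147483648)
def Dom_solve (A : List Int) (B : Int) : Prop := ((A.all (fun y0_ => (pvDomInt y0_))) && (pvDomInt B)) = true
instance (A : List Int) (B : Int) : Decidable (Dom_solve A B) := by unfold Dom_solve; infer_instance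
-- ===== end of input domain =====

-- B answers "how many elements greater than the pivot in the window" with a
-- merge-sort tree (a segment tree of sorted lists, queried by binary search)
-- instead of A's linear rescan of the tail at every recomputation index;
-- objective: alternative data structure, same proved return value everywhere.

-- ===== PORT A =====
-- one iteration of A's outer `for i in range(n)` loop over the state (total, count)
def aStep (A : List Int) (B : Int) (n : Int) : (Int × Int) → Int → (Int × Int) := fun st i =>
  if st.2 = 0 then
    let count := (PySem.List.pyRange (i + 1) n 1).foldl
      (fun count j => if j < i + B ∧ PySem.List.pyGetD A i 0 < PySem.List.pyGetD A j 0 then count + 1 else count) st.2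
    (st.1 + PySem.List.pyGetD A i 0 * count, count - 1)
  else (st.1, st.2 - 1)

def solve (A : List Int) (B : Int) : Int :=
  let n : Int := A.length
  ((PySem.List.pyRange 0 n 1).foldl (aStep A B n) ((0 : Int), (0 : Int))).1

-- ===== PORT B =====
-- Source B's tree tuples ('leaf',) / ('single', x) / ('node', m, sorted, left, right)
inductive MTree : Type
  | leaf : MTree
  | single : Int → MTree
  | node : Nat → List Int → MTree → MTree → MTree
deriving Repr

-- Source B's `build`
def buildT (xs : List Int) : MTree :=
  if xs.length = 0 then .leaf
  else if xs.length = 1 then .single (PySem.List.pyGetD xs 0 0)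
  else
    let h := xs.length / 2
    .node xs.length (PySem.List.sorted xs (fun x => x) false)
      (buildT (xs.take h)) (buildT (xs.drop h))
termination_by xs.length
decreasing_by
  · simp only [List.length_take]; omega
  · simp only [List.length_drop]; omega

-- Source B's `upper_bound` while-loop; fuel bounds the iterations (hi - lo shrinks)
def ubGo (s : List Int) (v : Int) : Nat → Int → Int → Int
  | 0, lo, _ => lo
  | fuel + 1, lo, hi =>
    if lo < hi then
      let mid := PySem.Int.floordiv (lo + hi) 2
      if PySem.List.pyGetD s mid 0 ≤ v then ubGo s v fuel (mid + 1) hi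
      else ubGo s v fuel lo mid
    else lo

def upperBound (s : List Int) (v : Int) : Int := ubGo s v (s.length + 1) 0 (s.length : Int)

-- Source B's `query`
def queryT (v : Int) : MTree → Int → Int → Int
  | .leaf, _, _ => 0
  | .single x, l, r => if l ≤ 0 ∧ 1 ≤ r ∧ v < x then 1 else 0
  | .node m s tl tr, l, r =>
    if r ≤ 0 ∨ (m : Int) ≤ l then 0
    else if l ≤ 0 ∧ (m : Int) ≤ r then (s.length : Int) - upperBound s v
    else
      let h := m / 2
      queryT v tl l r + queryT v tr (l - (h : Int)) (r - (h : Int))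

-- Source B's `while i < n` loop; fuel = n + 1 bounds the iterations (i strictly increases)
def altGo (A : List Int) (B : Int) (tree : MTree) : Nat → Int → Int → Int
  | 0, _, total => total
  | fuel + 1, i, total =>
    if i < (A.length : Int) then
      let pivot := PySem.List.pyGetD A i 0
      let c := queryT pivot tree (i + 1) (i + B)
      let total := total + pivot * c
      if c = 0 then total else altGo A B tree fuel (i + c) total
    else total

def solve_alt (A : List Int) (B : Int) : Int :=
  altGo A B (buildT A) (A.length + 1) 0 0

-- ===== PRECONDITION & SPEC =====
def Spec_solve (A : List Int) (B : Int) (out : Int) : Prop := out = solve_alt A B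
instance (A : List Int) (B : Int) (out : Int) : Decidable (Spec_solve A B out) := by unfold Spec_solve; infer_instance

-- ===== CLAIM (what is proved, stated in full; the proofs are below) =====
def Claim_equal_solve : Prop := ∀ (A : List Int) (B : Int), Dom_solve A B → Spec_solve A B (solve A B)

-- ===== LEMMAS AND PROOFS =====

-- the number of elements of positions [l, r) of xs that exceed v, as B's query computes it
def cnt (xs : List Int) (l r v : Int) : Int :=
  (((xs.take r.toNat).drop l.toNat).countP (fun x => v < x) : Nat)

-- binary-search postcondition: result splits a monotone list at value v
lemma ubGo_post (s : List Int) (v : Int)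
    (hmono : ∀ (p q : Int), 0 ≤ p → p ≤ q → q < (s.length : Int) →
      PySem.List.pyGetD s p 0 ≤ PySem.List.pyGetD s q 0) :
    ∀ (fuel : Nat) (lo hi : Int), 0 ≤ lo → lo ≤ hi → hi ≤ (s.length : Int) →
      hi - lo ≤ (fuel : Int) →
      (∀ k : Int, 0 ≤ k → k < lo → PySem.List.pyGetD s k 0 ≤ v) →
      (∀ k : Int, hi ≤ k → k < (s.length : Int) → v < PySem.List.pyGetD s k 0) →
      0 ≤ ubGo s v fuel lo hi ∧ ubGo s v fuel lo hi ≤ (s.length : Int) ∧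
      (∀ k : Int, 0 ≤ k → k < ubGo s v fuel lo hi → PySem.List.pyGetD s k 0 ≤ v) ∧
      (∀ k : Int, ubGo s v fuel lo hi ≤ k → k < (s.length : Int) → v < PySem.List.pyGetD s k 0) := by
  intro fuel
  induction fuel with
  | zero =>
    intro lo hi h0 hlh hhn hf hbelow habove
    have : lo = hi := by omega
    subst this
    simp only [ubGo]
    exact ⟨h0, hhn, hbelow, habove⟩
  | succ fuel ih =>
    intro lo hi h0 hlh hhn hf hbelow habove
    by_cases hlt : lo < hi
    · simp only [ubGo, if_pos hlt]
      set mid := PySem.Int.floordiv (lo + hi) 2 with hmid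
      have hbnd : mid * 2 ≤ lo + hi ∧ lo + hi < (mid + 1) * 2 :=
        (PySem.Int.floordiv_eq_iff_of_pos (by norm_num)).1 hmid.symm
      have hm1 : lo ≤ mid := by omega
      have hm2 : mid < hi := by omega
      by_cases hle : PySem.List.pyGetD s mid 0 ≤ v
      · simp only [if_pos hle]
        refine ih (mid + 1) hi (by omega) (by omega) hhn (by omega) ?_ habove
        intro k hk0 hklt
        exact le_trans (hmono k mid hk0 (by omega) (by omega)) hle
      · simp only [if_neg hle]
        refine ih lo mid h0 (by omega) (by omega) (by omega) hbelow ?_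
        intro k hk0 hklt
        exact lt_of_lt_of_le (by omega : v < PySem.List.pyGetD s mid 0)
          (hmono mid k (by omega) hk0 hklt)
    · simp only [ubGo, if_neg hlt]
      have : lo = hi := by omega
      subst this
      exact ⟨h0, by omega, hbelow, habove⟩

-- any split point yields the count of elements greater than v
lemma countP_of_split (s : List Int) (v r : Int) (h0 : 0 ≤ r) (hr : r ≤ (s.length : Int))
    (hbelow : ∀ k : Int, 0 ≤ k → k < r → PySem.List.pyGetD s k 0 ≤ v)
    (habove : ∀ k : Int, r ≤ k → k < (s.length : Int) → v < PySem.List.pyGetD s k 0) :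
    (s.countP (fun x => v < x) : Int) = (s.length : Int) - r := by
  have hsplit : s = s.take r.toNat ++ s.drop r.toNat := (List.take_append_drop _ _).symm
  have hrn : r.toNat ≤ s.length := by omega
  have h1 : (s.take r.toNat).countP (fun x => v < x) = 0 := by
    refine List.countP_eq_zero.2 fun x hx => ?_
    obtain ⟨k, hk, hkx⟩ := List.mem_iff_getElem.1 hx
    have hklen : k < s.length := by
      have := List.length_take (i := r.toNat) (l := s); omega
    have hget : (s.take r.toNat)[k] = s[k] := List.getElem_take
    have hle : s[k] ≤ v := by
      have := hbelow (k : Int) (by omega) (by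
        have hkr : k < r.toNat := by
          have := List.length_take (i := r.toNat) (l := s); omega
        omega)
      rwa [PySem.List.pyGetD_eq_getElem s 0 (by omega) (by exact_mod_cast hklen)] at this
    simp [← hkx, hget]
    omega
  have h2 : (s.drop r.toNat).countP (fun x => v < x) = (s.drop r.toNat).length := by
    refine List.countP_eq_length.2 fun x hx => ?_
    obtain ⟨k, hk, hkx⟩ := List.mem_iff_getElem.1 hx
    have hklen : r.toNat + k < s.length := by
      have := List.length_drop (i := r.toNat) (l := s); omega
    have hget : (s.drop r.toNat)[k] = s[r.toNat + k] := List.getElem_drop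
    have hgt : v < s[r.toNat + k] := by
      have h := habove ((r.toNat + k : Nat) : Int) (by omega) (by exact_mod_cast hklen)
      rw [PySem.List.pyGetD_eq_getElem s 0 (by omega) (by exact_mod_cast hklen)] at h
      simpa only [show ((r.toNat + k : Nat) : Int).toNat = r.toNat + k by omega] using h
    simp [← hkx, hget]
    omega
  calc (s.countP (fun x => v < x) : Int)
      = (((s.take r.toNat).countP (fun x => v < x)
          + (s.drop r.toNat).countP (fun x => v < x) : Nat) : Int) := by
        conv_lhs => rw [hsplit]
        rw [List.countP_append]
    _ = (s.length : Int) - r := by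
        rw [h1, h2, List.length_drop]
        omega

-- B's upper_bound on a monotone list
lemma upperBound_count (s : List Int)
    (hmono : ∀ (p q : Int), 0 ≤ p → p ≤ q → q < (s.length : Int) →
      PySem.List.pyGetD s p 0 ≤ PySem.List.pyGetD s q 0) (v : Int) :
    (s.length : Int) - upperBound s v = (s.countP (fun x => v < x) : Int) := by
  obtain ⟨h0, h1, h2, h3⟩ := ubGo_post s v hmono (s.length + 1) 0 (s.length : Int)
    (by omega) (by omega) (by omega) (by push_cast; omega)
    (by intro k hk hk'; omega) (by intro k hk hk'; omega)
  rw [countP_of_split s v (upperBound s v) h0 h1 h2 h3]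

-- the sorted list is monotone, stated through Python indexing
lemma sorted_mono (xs : List Int) :
    ∀ (p q : Int), 0 ≤ p → p ≤ q →
      q < ((PySem.List.sorted xs (fun x => x) false).length : Int) →
      PySem.List.pyGetD (PySem.List.sorted xs (fun x => x) false) p 0
        ≤ PySem.List.pyGetD (PySem.List.sorted xs (fun x => x) false) q 0 := by
  intro p q hp hpq hq
  rw [PySem.List.pyGetD_eq_getElem _ 0 hp (by omega),
    PySem.List.pyGetD_eq_getElem _ 0 (by omega) hq]
  exact PySem.List.sorted_id_getElem_mono xs (by omega) (by omega)

-- cnt distributes over the concatenation at the tree's split point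
lemma cnt_split (L R : List Int) (l r v : Int) :
    cnt (L ++ R) l r v = cnt L l r v + cnt R (l - L.length) (r - L.length) v := by
  unfold cnt
  rw [List.take_append, List.drop_append, List.countP_append]
  by_cases h : L.length ≤ r.toNat
  · have e0 : (L.take r.toNat).length = L.length := by
      rw [List.length_take]; omega
    have e1 : r.toNat - L.length = (r - (L.length : Int)).toNat := by omega
    have e2 : l.toNat - (L.take r.toNat).length = (l - (L.length : Int)).toNat := by
      rw [e0]; omega
    rw [e1, e2]
    push_cast
    ring
  · have e1 : r.toNat - L.length = 0 := by omega
    have e2 : (r - (L.length : Int)).toNat = 0 := by omega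
    rw [e1, e2]
    simp
-- query on the built tree counts the greater elements of the clamped segment
lemma query_build (xs : List Int) : ∀ (l r v : Int),
    queryT v (buildT xs) l r = cnt xs l r v := by
  induction xs using buildT.induct with
  | case1 x h0 =>
    intro l r v
    have hx : x = [] := List.length_eq_zero_iff.1 h0
    subst hx
    rw [buildT.eq_def]
    simp [queryT, cnt]
  | case2 x h0 h1 =>
    intro l r v
    obtain ⟨a, hx⟩ : ∃ a, x = [a] := List.length_eq_one_iff.1 h1
    subst hx
    rw [buildT.eq_def]
    simp only [List.length_singleton]
    show queryT v (.single (PySem.List.pyGetD [a] 0 0)) l r = cnt [a] l r v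
    have hget : PySem.List.pyGetD [a] 0 0 = a := rfl
    rw [hget]
    unfold queryT cnt
    by_cases hl : l ≤ 0
    · by_cases hr : 1 ≤ r
      · have e1 : r.toNat = (r.toNat - 1) + 1 := by omega
        have e2 : l.toNat = 0 := by omega
        rw [e1, e2]
        by_cases hv : v < a
        · simp [hl, hr, hv, List.take_succ_cons]
        · simp [hl, hr, hv, List.take_succ_cons]
      · have e1 : r.toNat = 0 := by omega
        simp [hr, e1]
    · have e2 : l.toNat ≠ 0 := by omega
      have : ([a].take r.toNat).drop l.toNat = [] := by
        apply List.drop_eq_nil_of_le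
        simp only [List.length_take, List.length_singleton]
        omega
      simp [hl, this]
  | case3 x h0 h1 hnat ih1 ih2 =>
    intro l r v
    rw [buildT.eq_def]
    simp only [if_neg h0, if_neg h1]
    set n := x.length with hn
    set h := n / 2 with hh
    have hhn : h < n := by omega
    have hh1 : 1 ≤ h := by omega
    simp only [queryT]
    by_cases hc1 : r ≤ 0 ∨ (n : Int) ≤ l
    · rw [if_pos hc1]
      unfold cnt
      rcases hc1 with hr | hl
      · have : r.toNat = 0 := by omega
        simp [this]
      · have : (x.take r.toNat).drop l.toNat = [] := by
          apply List.drop_eq_nil_of_le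
          rw [List.length_take]
          omega
        simp [this]
    · rw [if_neg hc1]
      by_cases hc2 : l ≤ 0 ∧ (n : Int) ≤ r
      · rw [if_pos hc2]
        obtain ⟨hl, hr⟩ := hc2
        have hlen : (PySem.List.sorted x (fun y => y) false).length = n :=
          PySem.List.length_sorted x (fun y => y) false
        rw [upperBound_count _ (sorted_mono x) v]
        have hperm : (PySem.List.sorted x (fun y => y) false).Perm x :=
          PySem.List.sorted_perm x (fun y => y) false
        rw [hperm.countP_eq]
        unfold cnt
        have e1 : l.toNat = 0 := by omega
        have e2 : x.take r.toNat = x := List.take_of_length_le (by omega)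
        rw [e1, e2, List.drop_zero]
      · rw [if_neg hc2]
        rw [ih1 l r v, ih2 (l - (h : Int)) (r - (h : Int)) v]
        conv_rhs => rw [← List.take_append_drop h x]
        rw [cnt_split]
        have e : ((x.take h).length : Int) = (h : Int) := by
          rw [List.length_take]; omega
        rw [e]

-- bridge: B's window query equals the count over A's (clamped) slice
lemma query_count (A : List Int) (B i : Int) (hi0 : 0 ≤ i) (_hin : i < (A.length : Int)) :
    queryT (PySem.List.pyGetD A i 0) (buildT A) (i + 1) (i + B)
      = (((if 0 < B then PySem.List.slice A (some (i + 1)) (some (i + B)) else []).countP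
          (fun x => PySem.List.pyGetD A i 0 < x) : Nat) : Int) := by
  rw [query_build]
  by_cases hB : 0 < B
  · rw [if_pos hB]
    unfold cnt
    rw [PySem.List.slice_toNat A (by omega) (by omega), List.drop_take]
  · rw [if_neg hB]
    unfold cnt
    have : (A.take (i + B).toNat).drop (i + 1).toNat = [] := by
      apply List.drop_eq_nil_of_le
      rw [List.length_take]
      omega
    simp [this]

-- once A's counter is negative it never reaches 0 again, so the total is frozen
lemma foldl_aStep_neg (A : List Int) (B n : Int) (l : List Int) :
    ∀ (t c : Int), c < 0 → (l.foldl (aStep A B n) (t, c)).1 = t := by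
  induction l with
  | nil => intro t c _; rfl
  | cons x xs ih =>
    intro t c hc
    have hne : c ≠ 0 := by omega
    simp only [List.foldl_cons, aStep, hne, if_false]
    exact ih t (c - 1) (by omega)

-- a positive counter only skips: folding from i with counter c equals folding from i+c with counter 0
lemma foldl_aStep_skip (A : List Int) (B n : Int) :
    ∀ (c : Nat) (i t : Int),
      (((PySem.List.pyRange i n 1).foldl (aStep A B n) (t, (c : Int))).1
        = ((PySem.List.pyRange (i + c) n 1).foldl (aStep A B n) (t, 0)).1) := by
  intro c
  induction c with
  | zero => intro i t; simp
  | succ c ih =>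
    intro i t
    by_cases h : i < n
    · rw [PySem.List.pyRange_one_cons h]
      have hstep : aStep A B n (t, ((c + 1 : Nat) : Int)) i = (t, (c : Int)) := by
        have hne : ((c + 1 : Nat) : Int) ≠ 0 := by push_cast; omega
        simp only [aStep, if_neg hne]
        have hsub : ((c + 1 : Nat) : Int) - 1 = (c : Int) := by push_cast; ring
        rw [hsub]
      rw [List.foldl_cons, hstep, ih (i + 1) t,
        show i + 1 + (c : Int) = i + ((c + 1 : Nat) : Int) by push_cast; ring]
    · rw [PySem.List.pyRange_one_eq_nil (by omega), PySem.List.pyRange_one_eq_nil (by omega)]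
      rfl

lemma foldl_aStep_skip' (A : List Int) (B n : Int) (c i t : Int) (hc : 0 ≤ c) :
    ((PySem.List.pyRange i n 1).foldl (aStep A B n) (t, c)).1
      = ((PySem.List.pyRange (i + c) n 1).foldl (aStep A B n) (t, 0)).1 := by
  obtain ⟨k, rfl⟩ := Int.eq_ofNat_of_zero_le hc
  exact foldl_aStep_skip A B n k i t

-- A's inner counting loop computes the count over the clamped window slice
lemma inner_count_eq (A : List Int) (B i : Int) (hi0 : 0 ≤ i) (hin : i < (A.length : Int)) :
    (PySem.List.pyRange (i + 1) (A.length : Int) 1).foldl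
      (fun count j => if j < i + B ∧ PySem.List.pyGetD A i 0 < PySem.List.pyGetD A j 0 then count + 1 else count) 0
    = (((if 0 < B then PySem.List.slice A (some (i + 1)) (some (i + B)) else []).countP
        (fun x => PySem.List.pyGetD A i 0 < x) : Nat) : Int) := by
  set pivot := PySem.List.pyGetD A i 0 with hpivot
  set n : Int := (A.length : Int) with hn
  have hfold :
      (PySem.List.pyRange (i + 1) n 1).foldl
        (fun count j => if j < i + B ∧ pivot < PySem.List.pyGetD A j 0 then count + 1 else count) 0
      = ((List.countP (fun j => decide (j < i + B ∧ pivot < PySem.List.pyGetD A j 0))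
            (PySem.List.pyRange (i + 1) n 1) : Nat) : Int) := by
    have := PySem.List.foldl_count_if
      (fun j => decide (j < i + B ∧ pivot < PySem.List.pyGetD A j 0))
      (PySem.List.pyRange (i + 1) n 1) 0
    simpa [decide_eq_true_eq] using this
  rw [hfold]
  by_cases hB : 0 < B
  · simp only [if_pos hB]
    set m : Int := min (i + B) n with hm
    have h1 : i + 1 ≤ m := by omega
    have h2 : m ≤ n := by omega
    rw [PySem.List.pyRange_one_append (i + 1) m n h1 h2, List.countP_append]
    have htail : List.countP (fun j => decide (j < i + B ∧ pivot < PySem.List.pyGetD A j 0))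
        (PySem.List.pyRange m n 1) = 0 := by
      apply List.countP_eq_zero.2
      intro j hj
      have := (PySem.List.mem_pyRange_one).1 hj
      simp only [decide_eq_true_eq, not_and]
      intro hjb
      omega
    have hhead : List.countP (fun j => decide (j < i + B ∧ pivot < PySem.List.pyGetD A j 0))
        (PySem.List.pyRange (i + 1) m 1)
        = List.countP (fun j => decide (pivot < PySem.List.pyGetD A j 0))
            (PySem.List.pyRange (i + 1) m 1) := by
      apply List.countP_congr
      intro j hj
      have := (PySem.List.mem_pyRange_one).1 hj
      simp only [decide_eq_true_eq]
      constructor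
      · rintro ⟨_, h⟩; exact h
      · intro h; exact ⟨by omega, h⟩
    rw [htail, hhead]
    have hslice : PySem.List.slice A (some (i + 1)) (some (i + B))
        = (PySem.List.pyRange (i + 1) m 1).map (fun j => PySem.List.pyGetD A j 0) := by
      have hsplit := PySem.List.pyRange_one_append (i + 1) m n h1 h2
      have hall : (PySem.List.pyRange (i + 1) n 1).map (fun j => PySem.List.pyGetD A j 0)
          = A.drop (i + 1).toNat := by
        have h0 := PySem.List.map_pyGetD_pyRange A 0 (a := i + 1) (by omega)
        rw [PySem.List.len_eq] at h0
        rw [hn]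
        exact h0
      rw [hsplit, List.map_append] at hall
      have hlen : ((PySem.List.pyRange (i + 1) m 1).map (fun j => PySem.List.pyGetD A j 0)).length
          = (m - (i + 1)).toNat := by
        rw [List.length_map, PySem.List.length_pyRange_one]
      have htake : (PySem.List.pyRange (i + 1) m 1).map (fun j => PySem.List.pyGetD A j 0)
          = (A.drop (i + 1).toNat).take ((m - (i + 1)).toNat) := by
        rw [← hlen, ← hall, List.take_left]
      rw [htake, PySem.List.slice_toNat A (by omega) (by omega)]
      apply List.take_eq_take_iff.2
      have hdl : (A.drop (i + 1).toNat).length = A.length - (i + 1).toNat := List.length_drop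
      omega
    rw [hslice, List.countP_map]
    rfl
  · have hz : List.countP (fun j => decide (j < i + B ∧ pivot < PySem.List.pyGetD A j 0))
        (PySem.List.pyRange (i + 1) n 1) = 0 := by
      refine List.countP_eq_zero.2 fun j hj => ?_
      have hmem := (PySem.List.mem_pyRange_one).1 hj
      simp only [decide_eq_true_eq, not_and]
      intro hjb
      omega
    rw [hz, if_neg hB]
    simp

-- main invariant: from any restart point i (counter 0), A's remaining fold equals B's loop
lemma main_inv (A : List Int) (B : Int) :
    ∀ (fuel : Nat) (i t : Int), 0 ≤ i → (A.length : Int) - i ≤ (fuel : Int) →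
      ((PySem.List.pyRange i (A.length : Int) 1).foldl (aStep A B (A.length : Int)) (t, 0)).1
        = altGo A B (buildT A) fuel i t := by
  intro fuel
  induction fuel with
  | zero =>
    intro i t hi0 hfe
    rw [PySem.List.pyRange_one_eq_nil (by omega)]
    rfl
  | succ fuel ih =>
    intro i t hi0 hfe
    by_cases h : i < (A.length : Int)
    · rw [PySem.List.pyRange_one_cons h]
      simp only [List.foldl_cons]
      have hstep : aStep A B (A.length : Int) (t, 0) i
          = (t + PySem.List.pyGetD A i 0 *
               (((if 0 < B then PySem.List.slice A (some (i + 1)) (some (i + B)) else []).countP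
                  (fun x => PySem.List.pyGetD A i 0 < x) : Nat) : Int),
             (((if 0 < B then PySem.List.slice A (some (i + 1)) (some (i + B)) else []).countP
                  (fun x => PySem.List.pyGetD A i 0 < x) : Nat) : Int) - 1) := by
        simp only [aStep]
        rw [inner_count_eq A B i hi0 h]
        simp
      rw [hstep]
      set c : Int := (((if 0 < B then PySem.List.slice A (some (i + 1)) (some (i + B)) else []).countP
          (fun x => PySem.List.pyGetD A i 0 < x) : Nat) : Int) with hc
      have hc0 : 0 ≤ c := by positivity
      have haltc : queryT (PySem.List.pyGetD A i 0) (buildT A) (i + 1) (i + B) = c :=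
        query_count A B i hi0 h
      by_cases hcz : c = 0
      · rw [show altGo A B (buildT A) (fuel + 1) i t
            = (if i < (A.length : Int) then
                (if queryT (PySem.List.pyGetD A i 0) (buildT A) (i + 1) (i + B) = 0 then
                  t + PySem.List.pyGetD A i 0 * queryT (PySem.List.pyGetD A i 0) (buildT A) (i + 1) (i + B)
                 else altGo A B (buildT A) fuel
                   (i + queryT (PySem.List.pyGetD A i 0) (buildT A) (i + 1) (i + B))
                   (t + PySem.List.pyGetD A i 0 * queryT (PySem.List.pyGetD A i 0) (buildT A) (i + 1) (i + B)))
               else t) from rfl, if_pos h, haltc, if_pos hcz]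
        rw [hcz]
        exact foldl_aStep_neg A B _ _ _ _ (by omega)
      · rw [show altGo A B (buildT A) (fuel + 1) i t
            = (if i < (A.length : Int) then
                (if queryT (PySem.List.pyGetD A i 0) (buildT A) (i + 1) (i + B) = 0 then
                  t + PySem.List.pyGetD A i 0 * queryT (PySem.List.pyGetD A i 0) (buildT A) (i + 1) (i + B)
                 else altGo A B (buildT A) fuel
                   (i + queryT (PySem.List.pyGetD A i 0) (buildT A) (i + 1) (i + B))
                   (t + PySem.List.pyGetD A i 0 * queryT (PySem.List.pyGetD A i 0) (buildT A) (i + 1) (i + B)))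
               else t) from rfl, if_pos h, haltc, if_neg hcz]
        rw [foldl_aStep_skip' A B _ (c - 1) (i + 1) _ (by omega)]
        have harg : i + 1 + (c - 1) = i + c := by ring
        rw [harg]
        exact ih (i + c) _ (by omega) (by omega)
    · rw [PySem.List.pyRange_one_eq_nil (by omega)]
      cases fuel with
      | zero => simp [altGo, h]
      | succ f => simp [altGo, h]

-- ===== VERDICT (by name: the statement is the Claim_ definition above) =====
theorem solve_spec : Claim_equal_solve := by
  intro A B _
  unfold Spec_solve solve solve_alt
  exact main_inv A B (A.length + 1) 0 0 (by omega) (by push_cast; omega)
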